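-- pv_equiv track=rewrite | github.com/fredshone/composhed | composhed/assembly.py | _split_by_flags
-- ===== SOURCE A (Python) =====
-- def _split_by_flags(
--     disc: list[tuple[str, int]], flags: list[bool]
-- ) -> tuple[list[tuple[str, int]], list[tuple[str, int]]]:
--     """Split disc activities into pre-work and post-work by flags."""
--     if len(flags) < len(disc):
--         flags = flags + [False] * (len(disc) - len(flags))
--     pre = [(a, d) for (a, d), f in zip(disc, flags) if f]
--     post = [(a, d) for (a, d), f in zip(disc, flags) if not f]
--     return pre, post
-- ===== SOURCE B (Python) =====
-- def _split_by_flags(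
--     disc: list[tuple[str, int]], flags: list[bool]
-- ) -> tuple[list[tuple[str, int]], list[tuple[str, int]]]:
--     """Split disc activities into pre-work and post-work by flags."""
--     if not disc:
--         return [], []
--     head = disc[0]
--     f = flags[0] if flags else False
--     pre, post = _split_by_flags(disc[1:], flags[1:])
--     if f:
--         return [head] + pre, post
--     return pre, [head] + post
-- ===== Notes on version B (the rewrite author's own statement) =====
-- stated objective: alternative
-- what changed: Replaced A's explicit flags-padding followed by two separate filtered zip comprehensions with a structural recursion on disc that consumes flags in parallel (missing flags read as False) and builds both lists in one descent.
import Mathlib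
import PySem

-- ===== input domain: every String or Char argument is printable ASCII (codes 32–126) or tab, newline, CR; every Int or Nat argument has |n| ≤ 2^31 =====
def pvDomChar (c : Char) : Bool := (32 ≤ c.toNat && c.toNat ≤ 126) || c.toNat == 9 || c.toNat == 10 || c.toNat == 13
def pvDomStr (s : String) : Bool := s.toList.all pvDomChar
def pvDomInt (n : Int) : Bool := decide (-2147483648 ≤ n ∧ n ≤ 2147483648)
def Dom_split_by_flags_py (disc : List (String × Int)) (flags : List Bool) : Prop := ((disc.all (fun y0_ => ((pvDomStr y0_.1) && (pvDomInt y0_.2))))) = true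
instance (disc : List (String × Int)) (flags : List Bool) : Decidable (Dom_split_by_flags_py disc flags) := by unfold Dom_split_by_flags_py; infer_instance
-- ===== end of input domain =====

-- B replaces A's flags-padding + two filtered zip comprehensions with one structural recursion
-- building both lists in a single pass (objective: alternative decomposition, same cost).

-- ===== PORT A =====
-- pad flags with False up to disc's length, then two filtered comprehensions over the zip
def split_by_flags_py (disc : List (String × Int)) (flags : List Bool) : (List (String × Int)) × (List (String × Int)) :=
  let flags' := if flags.length < disc.length
    then flags ++ List.replicate (disc.length - flags.length) false
    else flags
  let pre := ((disc.zip flags').filter (fun p => p.2)).map (fun p => p.1)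
  let post := ((disc.zip flags').filter (fun p => !p.2)).map (fun p => p.1)
  (pre, post)

-- ===== PORT B =====
-- structural recursion on disc, consuming flags in parallel; empty flags read as False
def split_by_flags_py_alt (disc : List (String × Int)) (flags : List Bool) : (List (String × Int)) × (List (String × Int)) :=
  match disc with
  | [] => ([], [])
  | head :: rest =>
    let f := match flags with | [] => false | g :: _ => g
    let (pre, post) := split_by_flags_py_alt rest flags.tail
    if f then (head :: pre, post) else (pre, head :: post)

-- ===== PRECONDITION & SPEC =====
def Spec_split_by_flags_py (disc : List (String × Int)) (flags : List Bool) (out : (List (String × Int)) × (List (String × Int))) : Prop := out = split_by_flags_py_alt disc flags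
instance (disc : List (String × Int)) (flags : List Bool) (out : (List (String × Int)) × (List (String × Int))) : Decidable (Spec_split_by_flags_py disc flags out) := by unfold Spec_split_by_flags_py; infer_instance

-- ===== CLAIM (what is proved, stated in full; the proofs are below) =====
def Claim_equal_split_by_flags_py : Prop := ∀ (disc : List (String × Int)) (flags : List Bool), Dom_split_by_flags_py disc flags → Spec_split_by_flags_py disc flags (split_by_flags_py disc flags)

-- ===== LEMMAS AND PROOFS =====

-- A's conditional padding equals unconditionally appending (disc.length - flags.length) falses
theorem pad_eq (disc : List (String × Int)) (flags : List Bool) :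
    (if flags.length < disc.length
      then flags ++ List.replicate (disc.length - flags.length) false
      else flags)
    = flags ++ List.replicate (disc.length - flags.length) false := by
  split_ifs with h
  · rfl
  · rw [Nat.sub_eq_zero_of_le (by omega)]; simp

theorem split_core (disc : List (String × Int)) (flags : List Bool) :
    (((disc.zip (flags ++ List.replicate (disc.length - flags.length) false)).filter
        (fun p => p.2)).map (fun p => p.1),
     ((disc.zip (flags ++ List.replicate (disc.length - flags.length) false)).filter
        (fun p => !p.2)).map (fun p => p.1))
    = split_by_flags_py_alt disc flags := by
  induction disc generalizing flags with
  | nil => simp [split_by_flags_py_alt]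
  | cons h t ih =>
    cases flags with
    | nil =>
      simp only [List.length_cons, List.length_nil, Nat.sub_zero, List.nil_append,
        List.replicate_succ, List.zip_cons_cons, List.filter_cons]
      have := ih []
      simp only [List.length_nil, Nat.sub_zero, List.nil_append] at this
      simp [split_by_flags_py_alt, ← this]
    | cons g gs =>
      simp only [List.length_cons, Nat.succ_sub_succ, List.cons_append,
        List.zip_cons_cons, List.filter_cons]
      have := ih gs
      cases g <;> simp [split_by_flags_py_alt, ← this]

theorem split_eq (disc : List (String × Int)) (flags : List Bool) :
    split_by_flags_py disc flags = split_by_flags_py_alt disc flags := by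
  rw [split_by_flags_py, pad_eq]
  exact split_core disc flags

-- ===== VERDICT (by name: the statement is the Claim_ definition above) =====
theorem split_by_flags_py_spec : Claim_equal_split_by_flags_py := by
  intro disc flags _
  exact split_eq disc flags
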